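-- pv_equiv track=rewrite | github.com/MangelWare/longesttrain | longesttrain.py | solve_rec
-- ===== SOURCE A (Python) =====
-- def domino_fits(domino, start):
--     (a, b) = domino
--     return a == start or b == start
--
-- def get_fitting_direction(domino, start):
--     (a, b) = domino
--     if a == start:
--         return (a, b)
--     elif b == start:
--         return (b, a)
--     else:
--         raise(Exception(
--             "Trying to find direction of unfitting domino: (%d,%d) to %d!" % (a, b, start)))
--
-- def solve_rec(dominos, start):
--     max_length = 0
--     max_train = []
--     if start == None:
--         fitting_dominos = dominos
--     else:
--         # Filter for fitting
--         fitting_dominos = list(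
--             filter(lambda d: domino_fits(d, start), dominos))
--         # Rotate to fit
--         fitting_dominos = list(
--             map(lambda d: get_fitting_direction(d, start), fitting_dominos))
--
--     if len(fitting_dominos) == 0:
--         return (0, [])
--     else:
--         for (a, b) in fitting_dominos:
--             (length, train) = solve_rec(
--                 list(filter(lambda d: d != (a, b) and d != (b, a), dominos)), b)
--             if length + 1 > max_length:
--                 max_length = length + 1
--                 max_train = [(a, b)] + train
--
--         return (max_length, max_train)
-- ===== SOURCE B (Python) =====
-- def solve_rec(dominos, start):
--     # Longest domino train by memoized dynamic programming: a search state is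
--     # (set of removed pieces, exposed end value); each state's best train is
--     # computed once and cached.
--     memo = {}
--
--     def best(removed, s):
--         key = (removed, s)
--         if key in memo:
--             return memo[key]
--         result = (0, [])
--         for a, b in dominos:
--             canon = (a, b) if a <= b else (b, a)
--             if canon in removed:
--                 continue
--             if s is None or a == s:
--                 head = (a, b)
--             elif b == s:
--                 head = (b, a)
--             else:
--                 continue
--             length, train = best(removed | {canon}, head[1])
--             if length + 1 > result[0]:
--                 result = (length + 1, [head] + train)
--         memo[key] = result
--         return result
--
--     return best(frozenset(), start)
-- ===== Notes on version B (the rewrite author's own statement) =====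
-- stated objective: alternative
-- what changed: A is a naive exhaustive recursion that re-solves the same residual position once per path reaching it; B is memoized dynamic programming over states (set of removed canonical pieces, exposed end value), caching each state's best train in a dict so every state is solved once.
import Mathlib
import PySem

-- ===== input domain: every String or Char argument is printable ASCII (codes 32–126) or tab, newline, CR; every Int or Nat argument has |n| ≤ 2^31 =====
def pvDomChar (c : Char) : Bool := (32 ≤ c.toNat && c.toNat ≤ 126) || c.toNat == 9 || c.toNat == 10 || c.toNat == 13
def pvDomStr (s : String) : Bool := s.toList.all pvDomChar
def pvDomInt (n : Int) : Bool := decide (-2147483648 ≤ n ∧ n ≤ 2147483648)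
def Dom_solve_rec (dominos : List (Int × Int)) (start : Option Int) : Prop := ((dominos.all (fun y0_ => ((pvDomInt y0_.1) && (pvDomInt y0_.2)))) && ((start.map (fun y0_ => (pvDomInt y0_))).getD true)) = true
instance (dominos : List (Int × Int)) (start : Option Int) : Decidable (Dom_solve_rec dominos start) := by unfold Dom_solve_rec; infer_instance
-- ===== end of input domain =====

-- B replaces A's naive exhaustive recursion by memoized dynamic programming over
-- states (set of removed canonical pieces, exposed end value); objective: alternative.
-- Both ports carry a fuel counter (dominos.length + 1) only to make the recursion
-- structurally total; every recursive call strictly shrinks the residual list /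
-- grows the removed set, so fuel never runs out.

-- ===== PORT A =====
def dominoFits (domino : Int × Int) (start : Int) : Bool :=
  domino.1 == start || domino.2 == start

-- The `else` branch of A raises, but solve_rec only calls it on fitting dominos,
-- so that branch is unreachable; we return the domino unchanged there.
def getFittingDirection (domino : Int × Int) (start : Int) : Int × Int :=
  if domino.1 == start then (domino.1, domino.2)
  else if domino.2 == start then (domino.2, domino.1)
  else (domino.1, domino.2)

def solveRecGo : Nat → List (Int × Int) → Option Int → Int × List (Int × Int)
  | 0, _, _ => (0, [])   -- fuel exhausted: unreachable for fuel = length + 1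
  | fuel + 1, dominos, start =>
    let fitting :=
      match start with
      | none => dominos
      | some s => (dominos.filter (fun d => dominoFits d s)).map
          (fun d => getFittingDirection d s)
    if fitting.length == 0 then (0, [])
    else
      fitting.foldl (fun acc ab =>
        let rest := dominos.filter (fun d => !(d == ab) && !(d == (ab.2, ab.1)))
        let p := solveRecGo fuel rest (some ab.2)
        if acc.1 < p.1 + 1 then (p.1 + 1, ab :: p.2) else acc) (0, [])

def solve_rec (dominos : List (Int × Int)) (start : Option Int) : Int × (List (Int × Int)) :=
  solveRecGo (dominos.length + 1) dominos start

-- ===== PORT B =====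
abbrev BMemo := PySem.Dict (List (Int × Int) × Option Int) (Int × List (Int × Int))

-- Source B: canon = (a, b) if a <= b else (b, a)
def canonB (d : Int × Int) : Int × Int := if d.1 ≤ d.2 then d else (d.2, d.1)

-- Source B's head-orientation chain: None → keep; a == s → keep; b == s → flip; else skip
def orientB (s : Option Int) (d : Int × Int) : Option (Int × Int) :=
  match s with
  | none => some d
  | some v => if d.1 == v then some d else if d.2 == v then some (d.2, d.1) else none

-- Source B's best(removed, s): the memo dict is threaded through the loop
def bestGo : Nat → List (Int × Int) → BMemo → List (Int × Int) → Option Int →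
    (Int × List (Int × Int)) × BMemo
  | 0, _, memo, _, _ => ((0, []), memo)   -- fuel exhausted: unreachable
  | fuel + 1, dominos, memo, removed, s =>
    match memo.get? (removed, s) with
    | some v => (v, memo)
    | none =>
      let rm := dominos.foldl (fun acc d =>
        if PySem.Set.contains removed (canonB d) then acc
        else
          match orientB s d with
          | none => acc
          | some head =>
            let pm := bestGo fuel dominos acc.2 (PySem.Set.union removed [canonB d]) (some head.2)
            if acc.1.1 < pm.1.1 + 1 then ((pm.1.1 + 1, head :: pm.1.2), pm.2)
            else (acc.1, pm.2)) ((0, []), memo)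
      (rm.1, rm.2.insert (removed, s) rm.1)

def solve_rec_alt (dominos : List (Int × Int)) (start : Option Int) : Int × (List (Int × Int)) :=
  (bestGo (dominos.length + 1) dominos PySem.Dict.empty [] start).1

-- ===== PRECONDITION & SPEC =====
def Spec_solve_rec (dominos : List (Int × Int)) (start : Option Int) (out : Int × (List (Int × Int))) : Prop := out = solve_rec_alt dominos start
instance (dominos : List (Int × Int)) (start : Option Int) (out : Int × (List (Int × Int))) : Decidable (Spec_solve_rec dominos start out) := by unfold Spec_solve_rec; infer_instance

-- ===== CLAIM (what is proved, stated in full; the proofs are below) =====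
def Claim_equal_solve_rec : Prop := ∀ (dominos : List (Int × Int)) (start : Option Int), Dom_solve_rec dominos start → Spec_solve_rec dominos start (solve_rec dominos start)

-- ===== LEMMAS AND PROOFS =====

-- residual list of a state: the dominos whose canonical form is not yet removed
def remainingOf (dominos removed : List (Int × Int)) : List (Int × Int) :=
  dominos.filter (fun e => !(PySem.Set.contains removed (canonB e)))

-- the reference value of a state: A's recursion on the residual list
def RefV (dominos removed : List (Int × Int)) (s : Option Int) : Int × List (Int × Int) :=
  solveRecGo ((remainingOf dominos removed).length + 1) (remainingOf dominos removed) s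

-- the memo invariant: every cached entry is the reference value of its state
def GoodM (dominos : List (Int × Int)) (memo : BMemo) : Prop :=
  ∀ removed s v, memo.get? (removed, s) = some v → v = RefV dominos removed s

theorem canonB_eq_iff (e ab : Int × Int) :
    canonB e = canonB ab ↔ (e = ab ∨ e = (ab.2, ab.1)) := by
  obtain ⟨x, y⟩ := e; obtain ⟨a, b⟩ := ab
  simp only [canonB]
  split_ifs <;> simp only [Prod.mk.injEq] <;> omega

theorem orientB_cases {s : Option Int} {d head : Int × Int}
    (h : orientB s d = some head) : head = d ∨ head = (d.2, d.1) := by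
  cases s with
  | none => exact Or.inl (Option.some.inj h).symm
  | some v =>
    simp only [orientB] at h
    split_ifs at h <;> simp_all

theorem orientB_canon {s : Option Int} {d head : Int × Int}
    (h : orientB s d = some head) : canonB head = canonB d := by
  rcases orientB_cases h with rfl | rfl
  · rfl
  · obtain ⟨a, b⟩ := d
    simp only [canonB]
    split_ifs <;> simp only [Prod.mk.injEq] <;> omega

theorem fitting_eq_some (ds : List (Int × Int)) (s : Int) :
    (ds.filter (fun d => dominoFits d s)).map (fun d => getFittingDirection d s)
      = ds.filterMap (orientB (some s)) := by
  induction ds with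
  | nil => rfl
  | cons d t ih =>
    by_cases h1 : d.1 = s
    · have hf : dominoFits d s = true := by simp [dominoFits, h1]
      have hg : getFittingDirection d s = d := by subst h1; simp [getFittingDirection]
      have ho : orientB (some s) d = some d := by simp [orientB, h1]
      simp only [List.filter_cons, hf, if_true, List.map_cons, List.filterMap_cons, ho, hg, ih]
    · by_cases h2 : d.2 = s
      · have hf : dominoFits d s = true := by simp [dominoFits, h2]
        have hg : getFittingDirection d s = (d.2, d.1) := by subst h2; simp [getFittingDirection, h1]
        have ho : orientB (some s) d = some (d.2, d.1) := by simp [orientB, h1, h2]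
        simp only [List.filter_cons, hf, if_true, List.map_cons, List.filterMap_cons, ho, hg, ih]
      · have hf : dominoFits d s = false := by simp [dominoFits, h1, h2]
        have ho : orientB (some s) d = none := by simp [orientB, h1, h2]
        simp only [List.filter_cons, hf, Bool.false_eq_true, if_false, List.filterMap_cons, ho, ih]

theorem fitting_eq (ds : List (Int × Int)) (st : Option Int) :
    (match st with
      | none => ds
      | some s => (ds.filter (fun d => dominoFits d s)).map (fun d => getFittingDirection d s))
    = ds.filterMap (orientB st) := by
  cases st with
  | none => simp [orientB]
  | some s => exact fitting_eq_some ds s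

-- A's step, once the empty-fitting special case is absorbed into the fold
theorem solveRecGo_succ (fuel : Nat) (ds : List (Int × Int)) (st : Option Int) :
    solveRecGo (fuel + 1) ds st =
      (ds.filterMap (orientB st)).foldl (fun acc ab =>
        let rest := ds.filter (fun d => !(d == ab) && !(d == (ab.2, ab.1)))
        let p := solveRecGo fuel rest (some ab.2)
        if acc.1 < p.1 + 1 then (p.1 + 1, ab :: p.2) else acc) (0, []) := by
  simp only [solveRecGo]
  rw [show (match st with
      | none => ds
      | some s => (ds.filter (fun d => dominoFits d s)).map (fun d => getFittingDirection d s))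
    = ds.filterMap (orientB st) from fitting_eq ds st]
  cases h : ds.filterMap (orientB st) with
  | nil => rfl
  | cons a t => simp

theorem rest_length_lt {ds : List (Int × Int)} {st : Option Int} {ab : Int × Int}
    (h : ab ∈ ds.filterMap (orientB st)) :
    (ds.filter (fun d => !(d == ab) && !(d == (ab.2, ab.1)))).length < ds.length := by
  rcases List.mem_filterMap.mp h with ⟨d, hd, ho⟩
  have hc := orientB_cases ho
  apply List.length_filter_lt_length_iff_exists.mpr
  refine ⟨d, hd, ?_⟩
  rcases hc with rfl | rfl <;> simp

theorem solveRecGo_mono : ∀ (n : Nat) (ds : List (Int × Int)) (st : Option Int) (f f' : Nat),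
    ds.length ≤ n → ds.length < f → ds.length < f' →
    solveRecGo f ds st = solveRecGo f' ds st := by
  intro n
  induction n with
  | zero =>
    intro ds st f f' hn hf hf'
    have hds : ds = [] := List.eq_nil_of_length_eq_zero (Nat.le_zero.mp hn)
    subst hds
    obtain ⟨g, rfl⟩ : ∃ g, f = g + 1 := ⟨f - 1, by omega⟩
    obtain ⟨g', rfl⟩ : ∃ g', f' = g' + 1 := ⟨f' - 1, by omega⟩
    rw [solveRecGo_succ, solveRecGo_succ]
    simp
  | succ n ih =>
    intro ds st f f' hn hf hf'
    obtain ⟨g, rfl⟩ : ∃ g, f = g + 1 := ⟨f - 1, by omega⟩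
    obtain ⟨g', rfl⟩ : ∃ g', f' = g' + 1 := ⟨f' - 1, by omega⟩
    rw [solveRecGo_succ, solveRecGo_succ]
    apply PySem.List.foldl_congr_mem
    intro acc ab hab
    have hlt := rest_length_lt hab
    dsimp only
    rw [ih _ (some ab.2) g g' (by omega) (by omega) (by omega)]

theorem remaining_union (dominos removed : List (Int × Int)) (ab : Int × Int) :
    remainingOf dominos (PySem.Set.union removed [canonB ab]) =
      (remainingOf dominos removed).filter (fun e => !(e == ab) && !(e == (ab.2, ab.1))) := by
  unfold remainingOf
  rw [List.filter_filter]
  apply List.filter_congr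
  intro e _
  have hmem : canonB e ∈ PySem.Set.union removed [canonB ab] ↔
      canonB e ∈ removed ∨ (e = ab ∨ e = (ab.2, ab.1)) := by
    rw [PySem.Set.mem_union]
    simp [canonB_eq_iff]
  by_cases h1 : canonB e ∈ removed <;> by_cases h2 : e = ab <;>
    by_cases h3 : e = (ab.2, ab.1) <;>
      simp_all

theorem remaining_filterMap (dominos removed : List (Int × Int)) (s : Option Int) :
    (remainingOf dominos removed).filterMap (orientB s)
      = dominos.filterMap (fun d =>
          if PySem.Set.contains removed (canonB d) then none else orientB s d) := by
  unfold remainingOf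
  induction dominos with
  | nil => rfl
  | cons d t ih =>
    by_cases hm : canonB d ∈ removed <;>
      simp_all [List.filterMap_cons]

theorem fold_correct (fuel : Nat) (dominos removed : List (Int × Int)) (s : Option Int)
    (ih : ∀ (memo : BMemo) (removed' : List (Int × Int)) (s' : Option Int),
        GoodM dominos memo → (remainingOf dominos removed').length < fuel →
        (bestGo fuel dominos memo removed' s').1 = RefV dominos removed' s' ∧
          GoodM dominos (bestGo fuel dominos memo removed' s').2) :
    ∀ (l : List (Int × Int)), (∀ e, e ∈ l → e ∈ dominos) →
    ∀ (acc : (Int × List (Int × Int)) × BMemo), GoodM dominos acc.2 →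
    (remainingOf dominos removed).length < fuel + 1 →
    (l.foldl (fun acc d =>
        if PySem.Set.contains removed (canonB d) then acc
        else
          match orientB s d with
          | none => acc
          | some head =>
            let pm := bestGo fuel dominos acc.2 (PySem.Set.union removed [canonB d]) (some head.2)
            if acc.1.1 < pm.1.1 + 1 then ((pm.1.1 + 1, head :: pm.1.2), pm.2)
            else (acc.1, pm.2)) acc).1
      = (l.filterMap (fun d =>
            if PySem.Set.contains removed (canonB d) then none else orientB s d)).foldl
          (fun a ab =>
            let p := RefV dominos (PySem.Set.union removed [canonB ab]) (some ab.2)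
            if a.1 < p.1 + 1 then (p.1 + 1, ab :: p.2) else a) acc.1
      ∧ GoodM dominos
        (l.foldl (fun acc d =>
          if PySem.Set.contains removed (canonB d) then acc
          else
            match orientB s d with
            | none => acc
            | some head =>
              let pm := bestGo fuel dominos acc.2 (PySem.Set.union removed [canonB d]) (some head.2)
              if acc.1.1 < pm.1.1 + 1 then ((pm.1.1 + 1, head :: pm.1.2), pm.2)
              else (acc.1, pm.2)) acc).2 := by
  intro l
  induction l with
  | nil => intro _ acc hacc _; exact ⟨rfl, hacc⟩
  | cons d t iht =>
    intro hl acc hacc hrem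
    simp only [List.foldl_cons, List.filterMap_cons]
    by_cases hc : PySem.Set.contains removed (canonB d) = true
    · simp only [hc, if_true]
      exact iht (fun e he => hl e (List.mem_cons_of_mem _ he)) acc hacc hrem
    · have hcf : PySem.Set.contains removed (canonB d) = false := by
        simpa using hc
      cases ho : orientB s d with
      | none =>
        simp only [hcf, Bool.false_eq_true, if_false]
        exact iht (fun e he => hl e (List.mem_cons_of_mem _ he)) acc hacc hrem
      | some head =>
        have hcanon : canonB head = canonB d := orientB_canon ho
        have hdmem : d ∈ dominos := hl d List.mem_cons_self
        have hnm : canonB d ∉ removed := by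
          intro hm
          rw [(PySem.Set.contains_iff _ _).mpr hm] at hcf
          exact absurd hcf (by decide)
        have hdrem : d ∈ remainingOf dominos removed := by
          unfold remainingOf
          exact List.mem_filter.mpr ⟨hdmem, by simp [hnm]⟩
        have hhead : head ∈ (remainingOf dominos removed).filterMap (orientB s) :=
          List.mem_filterMap.mpr ⟨d, hdrem, ho⟩
        have hlen : (remainingOf dominos (PySem.Set.union removed [canonB d])).length < fuel := by
          have h1 : (remainingOf dominos (PySem.Set.union removed [canonB head])).length
              < (remainingOf dominos removed).length := by
            rw [remaining_union]
            exact rest_length_lt hhead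
          rw [hcanon] at h1
          omega
        obtain ⟨hpm1, hpm2⟩ := ih acc.2 (PySem.Set.union removed [canonB d]) (some head.2) hacc hlen
        simp only [hcf, Bool.false_eq_true, if_false, List.foldl_cons, hcanon]
        rw [hpm1]
        by_cases hcmp : acc.1.1
            < (RefV dominos (PySem.Set.union removed [canonB d]) (some head.2)).1 + 1
        · rw [if_pos hcmp, if_pos hcmp]
          exact iht (fun e he => hl e (List.mem_cons_of_mem d he)) _ hpm2 hrem
        · rw [if_neg hcmp, if_neg hcmp]
          exact iht (fun e he => hl e (List.mem_cons_of_mem d he)) _ hpm2 hrem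

theorem bestGo_correct : ∀ (fuel : Nat) (dominos : List (Int × Int)) (memo : BMemo)
    (removed : List (Int × Int)) (s : Option Int),
    GoodM dominos memo →
    (remainingOf dominos removed).length < fuel →
    (bestGo fuel dominos memo removed s).1 = RefV dominos removed s ∧
      GoodM dominos (bestGo fuel dominos memo removed s).2 := by
  intro fuel
  induction fuel with
  | zero => intro dominos memo removed s _ h; exact absurd h (Nat.not_lt_zero _)
  | succ fuel ih =>
    intro dominos memo removed s hg hrem
    simp only [bestGo]
    cases hlook : memo.get? (removed, s) with
    | some v => exact ⟨hg _ _ _ hlook, hg⟩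
    | none =>
      obtain ⟨h1, h2⟩ := fold_correct fuel dominos removed s (ih dominos) dominos
        (fun e he => he) ((0, []), memo) hg hrem
      have hval : (dominos.foldl (fun acc d =>
          if PySem.Set.contains removed (canonB d) then acc
          else
            match orientB s d with
            | none => acc
            | some head =>
              let pm := bestGo fuel dominos acc.2 (PySem.Set.union removed [canonB d]) (some head.2)
              if acc.1.1 < pm.1.1 + 1 then ((pm.1.1 + 1, head :: pm.1.2), pm.2)
              else (acc.1, pm.2)) ((0, []), memo)).1 = RefV dominos removed s := by
        rw [h1, ← remaining_filterMap]
        unfold RefV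
        rw [solveRecGo_succ]
        apply PySem.List.foldl_congr_mem
        intro a ab hab
        have hrest : (remainingOf dominos removed).filter
              (fun e => !(e == ab) && !(e == (ab.2, ab.1)))
            = remainingOf dominos (PySem.Set.union removed [canonB ab]) :=
          (remaining_union dominos removed ab).symm
        have hlt := rest_length_lt hab
        rw [hrest] at hlt
        dsimp only
        rw [hrest]
        rw [solveRecGo_mono (remainingOf dominos (PySem.Set.union removed [canonB ab])).length
          _ (some ab.2) _ ((remainingOf dominos (PySem.Set.union removed [canonB ab])).length + 1)
          (le_refl _) hlt (by omega)]
      refine ⟨hval, ?_⟩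
      intro r' s' v hv
      rw [PySem.Dict.get?_insert] at hv
      by_cases hk : (r', s') = (removed, s)
      · rw [if_pos hk] at hv
        have hk1 : r' = removed := congrArg Prod.fst hk
        have hk2 : s' = s := congrArg Prod.snd hk
        subst hk1
        subst hk2
        rw [← hval]
        exact (Option.some.inj hv).symm
      · rw [if_neg hk] at hv
        exact h2 _ _ _ hv

-- ===== VERDICT (by name: the statement is the Claim_ definition above) =====
theorem solve_rec_spec : Claim_equal_solve_rec := by
  intro dominos start _
  unfold Spec_solve_rec solve_rec solve_rec_alt
  have hrem : remainingOf dominos [] = dominos := by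
    unfold remainingOf
    simp
  have hg : GoodM dominos PySem.Dict.empty := by
    intro r s v hv
    rw [PySem.Dict.get?_empty] at hv
    cases hv
  have h := (bestGo_correct (dominos.length + 1) dominos PySem.Dict.empty [] start hg
    (by rw [hrem]; omega)).1
  rw [h]
  unfold RefV
  rw [hrem]
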